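/- GENERATED by farm/mkstatement.py from design/units.tsv (unit `capture_pattern`) and the Specs of Vorbis/Spec/*.lean — do not edit.
   THE STATEMENT of the proof unit `capture_pattern`: the function `capture_pattern` (28 instructions) satisfies its contract,
   given the contracts of its callees. What the names mean: Vorbis/Spec/Basic.lean. The theorem to prove:
   `theorem capture_pattern_ok : Vorbis.Spec.capture_pattern.Statement`. -/
import Vorbis.Spec.Reader
namespace Vorbis.Spec.capture_pattern
open X86 X86.User Asan

/-- The statement of unit `capture_pattern`. -/
def Statement : Prop :=
  ∀ (Lay : Layout) (_hLay : Lay.hi = 0x1000000) (μ : Microarch) (_hμ : UserX.MicroOK μ) (u₀ : State)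
    (_hcode : HasCodeNat Lay u₀ Vorbis.L.capture_pattern.entry Vorbis.Code.code_capture_pattern.nat Vorbis.L.capture_pattern.size)
    (_h_get8 : ∀ (others : List Obj) (frames : List (Nat × FrameLayout)) (Blk : Block → Prop) (len : Nat), Calls Lay μ Vorbis.WayInv (Vorbis.conv u₀) Vorbis.L.get8.entry (Vorbis.Spec.get8.spec others frames Blk len)),
    ∀ (others : List Obj) (frames : List (Nat × FrameLayout)) (Blk : Block → Prop) (len : Nat), Calls Lay μ Vorbis.WayInv (Vorbis.conv u₀) Vorbis.L.capture_pattern.entry (Vorbis.Spec.capture_pattern.spec others frames Blk len)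

end Vorbis.Spec.capture_pattern
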